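-- pv_equiv track=rewrite | github.com/ValRat/aoc-2018 | day2/main.py | parse_num
-- ===== SOURCE A (Python) =====
-- def parse_num(in_str):
--     is_neg = -1 if (in_str[0] == '-') else 1
--     num = 0
--     for c in in_str[1:]:
--         if (c == '\n'):
--             break
--         num = (num * 10) + int(c)
--     return num * is_neg
-- ===== SOURCE B (Python) =====
-- def parse_num(in_str):
--     is_neg = -1 if in_str[0] == '-' else 1
--     digits = in_str[1:].split('\n', 1)[0]
--     total = sum(int(d) * 10 ** p for p, d in enumerate(reversed(digits)))
--     return total * is_neg
-- ===== Notes on version B (the rewrite author's own statement) =====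
-- stated objective: alternative
-- what changed: Replaces A's left-to-right Horner accumulation with a break inside the loop by cutting the tail at the first newline up front and summing digit*10**position over the reversed digit string.
import Mathlib
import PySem

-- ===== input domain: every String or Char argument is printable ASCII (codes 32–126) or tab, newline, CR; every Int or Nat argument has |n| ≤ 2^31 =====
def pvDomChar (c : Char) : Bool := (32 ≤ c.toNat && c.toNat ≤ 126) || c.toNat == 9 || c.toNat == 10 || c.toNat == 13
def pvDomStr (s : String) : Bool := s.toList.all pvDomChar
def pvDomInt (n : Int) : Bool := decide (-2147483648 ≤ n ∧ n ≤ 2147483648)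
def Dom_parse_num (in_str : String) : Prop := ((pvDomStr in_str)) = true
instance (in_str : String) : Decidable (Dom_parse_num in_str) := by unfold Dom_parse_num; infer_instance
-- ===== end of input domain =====

-- B replaces A's left-to-right Horner accumulation with a tail cut at the first newline
-- and a positional power-of-ten sum over the reversed digit string (objective: alternative).

-- int(c) for a single ASCII digit character (Pre_ guarantees c is a digit)
def pvDigit (c : Char) : Int := (c.toNat : Int) - 48

-- ===== PORT A =====
-- the for-loop of A with its break, over the chars of in_str[1:], Horner state num
def pvALoop : List Char → Int → Int
  | [], num => num
  | c :: cs, num => if c = '\n' then num else pvALoop cs (num * 10 + pvDigit c)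

def parse_num (in_str : String) : Int :=
  let is_neg : Int := if in_str.toList.head? = some '-' then -1 else 1
  pvALoop in_str.toList.tail 0 * is_neg

-- ===== PORT B =====
-- sum(int(d) * 10**p for p, d in enumerate(reversed(digits)))
def pvBSum (l : List Char) : Int :=
  (l.reverse.zipIdx).foldl (fun acc p => acc + pvDigit p.1 * 10 ^ p.2) 0

def parse_num_alt (in_str : String) : Int :=
  let is_neg : Int := if in_str.toList.head? = some '-' then -1 else 1
  let digits := in_str.toList.tail.takeWhile (· ≠ '\n')
  pvBSum digits * is_neg

-- ===== PRECONDITION & SPEC =====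
-- Pre_ excludes exactly the inputs where A raises: the empty string (IndexError on in_str[0])
-- and any tail whose portion before the first newline contains a non-digit (ValueError from int(c)).
def Pre_parse_num (in_str : String) : Prop :=
  in_str.toList ≠ [] ∧ (in_str.toList.tail.takeWhile (· ≠ '\n')).all Char.isDigit = true
instance (in_str : String) : Decidable (Pre_parse_num in_str) := by unfold Pre_parse_num; infer_instance

def pvWitness_parse_num : String := "-123"

def Spec_parse_num (in_str : String) (out : Int) : Prop := out = parse_num_alt in_str
instance (in_str : String) (out : Int) : Decidable (Spec_parse_num in_str out) := by unfold Spec_parse_num; infer_instance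

-- ===== CLAIM (what is proved, stated in full; the proofs are below) =====
def Claim_equal_parse_num : Prop := ∀ (in_str : String), Dom_parse_num in_str → Pre_parse_num in_str → Spec_parse_num in_str (parse_num in_str)

-- ===== LEMMAS AND PROOFS =====

-- A's loop is Horner over the prefix before the first '\n'
lemma pvALoop_eq_horner (cs : List Char) (num : Int) :
    pvALoop cs num = (cs.takeWhile (· ≠ '\n')).foldl (fun n c => n * 10 + pvDigit c) num := by
  induction cs generalizing num with
  | nil => rfl
  | cons c cs ih =>
      by_cases h : c = '\n'
      · simp [pvALoop, List.takeWhile, h]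
      · simp [pvALoop, List.takeWhile, h, ih]

-- appending a digit multiplies B's positional sum by 10 and adds the digit
lemma pvBSum_append (l : List Char) (c : Char) :
    pvBSum (l ++ [c]) = 10 * pvBSum l + pvDigit c := by
  unfold pvBSum
  rw [List.reverse_append]
  simp only [List.reverse_singleton, List.singleton_append, List.zipIdx_cons, List.foldl_cons]
  have key : ∀ (m : List (Char × Nat)) (a b : Int),
      m.foldl (fun acc p => acc + pvDigit p.1 * 10 ^ p.2) (a + b) =
      m.foldl (fun acc p => acc + pvDigit p.1 * 10 ^ p.2) a + b := by
    intro m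
    induction m with
    | nil => intro a b; rfl
    | cons x m ih => intro a b; simp only [List.foldl_cons]
                     rw [show a + b + pvDigit x.1 * 10 ^ x.2 = (a + pvDigit x.1 * 10 ^ x.2) + b by ring, ih]
  have shift : ∀ (m : List Char) (k : Nat) (a : Int),
      (m.zipIdx (k+1)).foldl (fun acc p => acc + pvDigit p.1 * 10 ^ p.2) (10 * a) =
      10 * (m.zipIdx k).foldl (fun acc p => acc + pvDigit p.1 * 10 ^ p.2) a := by
    intro m
    induction m with
    | nil => intro k a; rfl
    | cons x m ih =>
        intro k a
        simp only [List.zipIdx_cons, List.foldl_cons]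
        rw [show 10 * a + pvDigit x * 10 ^ (k+1) = 10 * (a + pvDigit x * 10 ^ k) by ring, ih]
  rw [show (0 : Int) + pvDigit c * 10 ^ 0 = 10 * 0 + pvDigit c by ring, key, shift]

-- Horner fold and B's positional sum agree (from 0)
lemma horner_eq_pvBSum (l : List Char) :
    l.foldl (fun n c => n * 10 + pvDigit c) 0 = pvBSum l := by
  induction l using List.reverseRecOn with
  | nil => rfl
  | append_singleton l c ih =>
      rw [List.foldl_append, List.foldl_cons, List.foldl_nil, pvBSum_append]
      have gen : ∀ (m : List Char) (a : Int),
          m.foldl (fun n c => n * 10 + pvDigit c) a =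
          a * 10 ^ m.length + m.foldl (fun n c => n * 10 + pvDigit c) 0 := by
        intro m
        induction m with
        | nil => intro a; simp
        | cons x m ihm =>
            intro a
            simp only [List.foldl_cons, List.length_cons]
            rw [ihm (a * 10 + pvDigit x), ihm (0 * 10 + pvDigit x)]
            ring
      rw [ih]; ring

-- ===== VERDICT (by name: the statement is the Claim_ definition above) =====
theorem parse_num_spec : Claim_equal_parse_num := by
  intro in_str _ _
  unfold Spec_parse_num parse_num parse_num_alt
  rw [pvALoop_eq_horner, horner_eq_pvBSum]
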